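-- pv_equiv track=rewrite | github.com/OreoFrappuccino2000/frame-extraction | app.py | _split_long_clause
-- ===== SOURCE A (Python) =====
-- from typing import List, Dict, Any, Optional, Tuple
--
-- def _vis_len_zh(s: str) -> int:
--     return sum(1 for ch in s if ch and not ch.isspace())
--
-- def _split_long_clause(clause: str, max_len: int) -> List[str]:
--     clause = (clause or "").strip()
--     if not clause or _vis_len_zh(clause) <= max_len: return [clause] if clause else []
--     parts, cur = [], ""
--     for ch in clause:
--         cur += ch
--         if _vis_len_zh(cur) >= max_len: parts.append(cur.strip()); cur = ""
--     if cur.strip(): parts.append(cur.strip())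
--     return parts
-- ===== SOURCE B (Python) =====
-- def _split_long_clause(clause, max_len):
--     clause = (clause or "").strip()
--     if not clause or sum(1 for ch in clause if not ch.isspace()) <= max_len:
--         return [clause] if clause else []
--     cuts, cnt, pos = [], 0, 0
--     for ch in clause:
--         pos += 1
--         if not ch.isspace():
--             cnt += 1
--         if cnt >= max_len:
--             cuts.append(pos)
--             cnt = 0
--     parts = [clause[a:b].strip() for a, b in zip([0] + cuts, cuts)]
--     tail = clause[(cuts[-1] if cuts else 0):].strip()
--     if tail:
--         parts.append(tail)
--     return parts
-- ===== Notes on version B (the rewrite author's own statement) =====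
-- stated objective: faster
-- what changed: A re-counts the visible (non-space) length of the growing chunk after every appended character; B makes one running-count pass that records cut positions and then slices the clause at those positions, so no per-character re-count remains.
import Mathlib
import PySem

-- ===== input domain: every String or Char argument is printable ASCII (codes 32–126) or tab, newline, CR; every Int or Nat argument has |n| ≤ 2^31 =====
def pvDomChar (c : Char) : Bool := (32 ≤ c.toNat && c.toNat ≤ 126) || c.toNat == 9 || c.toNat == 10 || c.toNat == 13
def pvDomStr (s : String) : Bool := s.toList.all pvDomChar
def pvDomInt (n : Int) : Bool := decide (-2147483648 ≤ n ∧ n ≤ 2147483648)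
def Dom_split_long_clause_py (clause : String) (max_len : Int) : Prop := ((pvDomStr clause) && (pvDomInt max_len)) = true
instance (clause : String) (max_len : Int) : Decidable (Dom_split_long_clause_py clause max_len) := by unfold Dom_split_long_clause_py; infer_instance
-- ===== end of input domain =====

-- B replaces A's accumulate-and-recount loop (which re-counts the visible length of the
-- growing chunk after every character) by a single running-count pass that records cut
-- positions, followed by slicing the clause at those positions.

-- ===== PORT A =====
-- sum(1 for ch in s if ch and not ch.isspace())   (ch, a 1-char string, is always truthy)
def vis_len_zh (s : List Char) : Int :=
  ((s.filter (fun ch => !PySem.Chars.isspace ch)).map (fun _ => (1 : Int))).sum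

-- loop body of A: cur += ch; if _vis_len_zh(cur) >= max_len: parts.append(cur.strip()); cur = ""
def stepA (max_len : Int) (st : List (List Char) × List Char) (ch : Char) :
    List (List Char) × List Char :=
  let cur := st.2 ++ [ch]
  if max_len ≤ vis_len_zh cur then (st.1 ++ [PySem.Chars.strip cur], []) else (st.1, cur)

def split_long_clause_py (clause : String) (max_len : Int) : List String :=
  let cs := PySem.Chars.strip clause.toList
  if cs = [] ∨ vis_len_zh cs ≤ max_len then
    (if cs = [] then [] else [String.ofList cs])
  else
    let st := cs.foldl (stepA max_len) ([], [])
    let parts := if PySem.Chars.strip st.2 ≠ [] then st.1 ++ [PySem.Chars.strip st.2] else st.1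
    parts.map String.ofList

-- ===== PORT B =====
-- sum(1 for ch in clause if not ch.isspace())
def visible_count (s : List Char) : Int :=
  ((s.filter (fun ch => !PySem.Chars.isspace ch)).map (fun _ => (1 : Int))).sum

-- loop body of B: pos += 1; if not ch.isspace(): cnt += 1; if cnt >= max_len: cuts.append(pos); cnt = 0
def stepB (max_len : Int) (st : List Nat × Int × Nat) (ch : Char) : List Nat × Int × Nat :=
  let pos := st.2.2 + 1
  let cnt := if PySem.Chars.isspace ch then st.2.1 else st.2.1 + 1
  if max_len ≤ cnt then (st.1 ++ [pos], 0, pos) else (st.1, cnt, pos)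

def split_long_clause_py_alt (clause : String) (max_len : Int) : List String :=
  let cs := PySem.Chars.strip clause.toList
  if cs = [] ∨ visible_count cs ≤ max_len then
    (if cs = [] then [] else [String.ofList cs])
  else
    let st := cs.foldl (stepB max_len) ([], 0, 0)
    let cuts := st.1
    let parts := ((0 :: cuts).zip cuts).map (fun ab =>
      PySem.Chars.strip (PySem.List.slice cs (some (ab.1 : Int)) (some (ab.2 : Int))))
    let tail := PySem.Chars.strip (PySem.List.slice cs (some ((cuts.getLastD 0 : Nat) : Int)) none)
    (if tail ≠ [] then parts ++ [tail] else parts).map String.ofList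

-- ===== PRECONDITION & SPEC =====
def Spec_split_long_clause_py (clause : String) (max_len : Int) (out : List String) : Prop := out = split_long_clause_py_alt clause max_len
instance (clause : String) (max_len : Int) (out : List String) : Decidable (Spec_split_long_clause_py clause max_len out) := by unfold Spec_split_long_clause_py; infer_instance

-- ===== CLAIM (what is proved, stated in full; the proofs are below) =====
def Claim_equal_split_long_clause_py : Prop := ∀ (clause : String) (max_len : Int), Dom_split_long_clause_py clause max_len → Spec_split_long_clause_py clause max_len (split_long_clause_py clause max_len)

-- ===== LEMMAS AND PROOFS =====

lemma vis_append (s : List Char) (c : Char) :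
    vis_len_zh (s ++ [c]) =
      (if PySem.Chars.isspace c then vis_len_zh s else vis_len_zh s + 1) := by
  by_cases h : PySem.Chars.isspace c <;>
    simp [vis_len_zh, List.filter_append, h]

lemma zip_shift_concat {α : Type} (a c : α) (l : List α) :
    ((a :: (l ++ [c])).zip (l ++ [c])) = ((a :: l).zip l) ++ [(l.getLastD a, c)] := by
  induction l generalizing a with
  | nil => rfl
  | cons x t ih =>
    have hlast : t.getLastD x = (x :: t).getLastD a := by
      cases t with
      | nil => rfl
      | cons y u =>
        have hz : (y :: u).getLast? = some ((y :: u).getLast (by simp)) :=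
          List.getLast?_eq_some_getLast (by simp)
        show (y :: u).getLast?.getD x = (y :: u).getLast?.getD a
        rw [hz]; rfl
    calc (a :: ((x :: t) ++ [c])).zip ((x :: t) ++ [c])
        = (a, x) :: ((x :: (t ++ [c])).zip (t ++ [c])) := rfl
      _ = (a, x) :: (((x :: t).zip t) ++ [(t.getLastD x, c)]) := by rw [ih x]
      _ = ((a :: x :: t).zip (x :: t)) ++ [((x :: t).getLastD a, c)] := by rw [hlast]; rfl

-- the chunk between two cuts, as B slices it
def chunkOf (s : List Char) (ab : Nat × Nat) : List Char :=
  PySem.Chars.strip ((s.take ab.2).drop ab.1)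

lemma aux (m : Int) (s : List Char) :
    ∀ (rest : List Char) (i : Nat) (cuts : List Nat) (cur : List Char),
    s.drop i = rest →
    cuts.getLastD 0 ≤ i →
    cur = (s.take i).drop (cuts.getLastD 0) →
    rest.foldl (stepA m) (((0 :: cuts).zip cuts).map (chunkOf s), cur) =
      ((((0 :: (rest.foldl (stepB m) (cuts, vis_len_zh cur, i)).1).zip
            (rest.foldl (stepB m) (cuts, vis_len_zh cur, i)).1).map (chunkOf s)),
        (s.take (i + rest.length)).drop
          ((rest.foldl (stepB m) (cuts, vis_len_zh cur, i)).1.getLastD 0)) ∧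
    (rest.foldl (stepB m) (cuts, vis_len_zh cur, i)).1.getLastD 0 ≤ i + rest.length ∧
    (rest.foldl (stepB m) (cuts, vis_len_zh cur, i)).2.2 = i + rest.length := by
  intro rest
  induction rest with
  | nil =>
    intro i cuts cur hdrop hle hcur
    refine ⟨?_, by simpa using hle, by simp⟩
    simp only [List.foldl_nil, List.length_nil, Nat.add_zero]
    rw [← hcur]
  | cons ch rest' ih =>
    intro i cuts cur hdrop hle hcur
    have hlt : i < s.length := by
      by_contra h
      have : s.drop i = [] := List.drop_eq_nil_of_le (by omega)
      rw [this] at hdrop; simp at hdrop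
    have hdrop' : s.drop (i + 1) = rest' := by
      have h1 : s.drop (i + 1) = (s.drop i).drop 1 := by
        rw [List.drop_drop]
      rw [h1, hdrop]; rfl
    have htake1 : (s.drop i).take 1 = [ch] := by rw [hdrop]; rfl
    have htake : s.take (i + 1) = s.take i ++ [ch] := by
      rw [List.take_add, htake1]
    have hlen : (s.take i).length = i := by
      simp [List.length_take]; omega
    have hcur' : cur ++ [ch] = (s.take (i + 1)).drop (cuts.getLastD 0) := by
      rw [htake, List.drop_append_of_le_length (by omega), hcur]
    have hvis : vis_len_zh (cur ++ [ch]) =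
        (if PySem.Chars.isspace ch then vis_len_zh cur else vis_len_zh cur + 1) :=
      vis_append cur ch
    simp only [List.foldl_cons]
    by_cases hfl : m ≤ (if PySem.Chars.isspace ch then vis_len_zh cur else vis_len_zh cur + 1)
    · -- flush
      have hA : stepA m (((0 :: cuts).zip cuts).map (chunkOf s), cur) ch =
          (((0 :: cuts).zip cuts).map (chunkOf s) ++ [PySem.Chars.strip (cur ++ [ch])], []) := by
        simp [stepA, hvis, hfl]
      have hB : stepB m (cuts, vis_len_zh cur, i) ch = (cuts ++ [i + 1], 0, i + 1) := by
        simp only [stepB]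
        rw [if_pos hfl]
      rw [hA, hB]
      have hmap : ((0 :: (cuts ++ [i + 1])).zip (cuts ++ [i + 1])).map (chunkOf s) =
          ((0 :: cuts).zip cuts).map (chunkOf s) ++ [PySem.Chars.strip (cur ++ [ch])] := by
        rw [zip_shift_concat]
        simp only [List.map_append, List.map_cons, List.map_nil, chunkOf]
        rw [← hcur']
      have hnil : ([] : List Char) = (s.take (i + 1)).drop ((cuts ++ [i + 1]).getLastD 0) := by
        rw [List.getLastD_concat]
        exact (List.drop_eq_nil_of_le (by simp [List.length_take])).symm
      have h0 : vis_len_zh ([] : List Char) = 0 := rfl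
      have := ih (i + 1) (cuts ++ [i + 1]) [] hdrop'
        (by rw [List.getLastD_concat]) hnil
      rw [h0] at this
      rw [← hmap]
      refine ⟨?_, ?_, ?_⟩ <;> simp only [List.length_cons]
      · rw [this.1]
        have h3 : i + 1 + rest'.length = i + (rest'.length + 1) := by omega
        rw [h3]
      · have h2 := this.2.1; omega
      · have h2 := this.2.2; omega
    · -- no flush
      have hA : stepA m (((0 :: cuts).zip cuts).map (chunkOf s), cur) ch =
          (((0 :: cuts).zip cuts).map (chunkOf s), cur ++ [ch]) := by
        simp [stepA, hvis, hfl]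
      have hB : stepB m (cuts, vis_len_zh cur, i) ch =
          (cuts, (if PySem.Chars.isspace ch then vis_len_zh cur else vis_len_zh cur + 1), i + 1) := by
        simp only [stepB]
        rw [if_neg hfl]
      rw [hA, hB, ← hvis]
      have := ih (i + 1) cuts (cur ++ [ch]) hdrop' (by omega) hcur'
      refine ⟨?_, ?_, ?_⟩ <;> simp only [List.length_cons]
      · rw [this.1]
        have h3 : i + 1 + rest'.length = i + (rest'.length + 1) := by omega
        rw [h3]
      · have h2 := this.2.1; omega
      · have h2 := this.2.2; omega

lemma slice_chunk (s : List Char) (a b : Nat) :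
    PySem.Chars.strip (PySem.List.slice s (some (a : Int)) (some (b : Int))) =
      chunkOf s (a, b) := by
  rw [PySem.List.slice_natCast, chunkOf, List.drop_take]

-- the non-trivial branch of both programs, with the lets expanded
lemma else_eq (m : Int) (cs : List Char) :
    (if PySem.Chars.strip (cs.foldl (stepA m) ([], [])).2 ≠ [] then
        (cs.foldl (stepA m) ([], [])).1 ++ [PySem.Chars.strip (cs.foldl (stepA m) ([], [])).2]
      else (cs.foldl (stepA m) ([], [])).1) =
    (if PySem.Chars.strip (PySem.List.slice cs
          (some (((cs.foldl (stepB m) ([], 0, 0)).1.getLastD 0 : Nat) : Int)) none) ≠ [] then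
        ((0 :: (cs.foldl (stepB m) ([], 0, 0)).1).zip (cs.foldl (stepB m) ([], 0, 0)).1).map
            (fun ab => PySem.Chars.strip (PySem.List.slice cs (some (ab.1 : Int)) (some (ab.2 : Int)))) ++
          [PySem.Chars.strip (PySem.List.slice cs
            (some (((cs.foldl (stepB m) ([], 0, 0)).1.getLastD 0 : Nat) : Int)) none)]
      else ((0 :: (cs.foldl (stepB m) ([], 0, 0)).1).zip (cs.foldl (stepB m) ([], 0, 0)).1).map
            (fun ab => PySem.Chars.strip (PySem.List.slice cs (some (ab.1 : Int)) (some (ab.2 : Int))))) := by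
  obtain ⟨h1, -, -⟩ := aux m cs cs 0 [] [] (by simp) (by simp) (by simp)
  have hz : vis_len_zh ([] : List Char) = 0 := rfl
  rw [hz] at h1
  simp only [List.zip_nil_right, List.map_nil, Nat.zero_add, List.take_length] at h1
  have hparts : ((0 :: (cs.foldl (stepB m) ([], 0, 0)).1).zip (cs.foldl (stepB m) ([], 0, 0)).1).map
      (fun ab => PySem.Chars.strip (PySem.List.slice cs (some (ab.1 : Int)) (some (ab.2 : Int)))) =
      ((0 :: (cs.foldl (stepB m) ([], 0, 0)).1).zip (cs.foldl (stepB m) ([], 0, 0)).1).map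
        (chunkOf cs) := by
    apply List.map_congr_left
    intro ab _
    exact slice_chunk cs ab.1 ab.2
  rw [hparts, PySem.List.slice_from_natCast, h1]

-- ===== VERDICT (by name: the statement is the Claim_ definition above) =====
theorem split_long_clause_py_spec : Claim_equal_split_long_clause_py := by
  intro clause max_len _
  unfold Spec_split_long_clause_py split_long_clause_py split_long_clause_py_alt
  have hvv : visible_count = vis_len_zh := rfl
  rw [hvv]
  by_cases hguard : PySem.Chars.strip clause.toList = [] ∨
      vis_len_zh (PySem.Chars.strip clause.toList) ≤ max_len
  · simp only [if_pos hguard]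
  · simp only [if_neg hguard]
    exact congrArg (List.map String.ofList) (else_eq max_len (PySem.Chars.strip clause.toList))
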